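-- pv_equiv track=rewrite | github.com/shemah77/backend_test_homework | TwoSum LeetCode.py | two_summ
-- ===== SOURCE A (Python) =====
-- def two_summ(array_inp: list, total: int):
--     # -> list:
--     sum_t = total
--     new_list = sorted(array_inp, reverse=True)
--     fin_list = []
--     fin_list2 = []  # фин список элементов позиции в изначальном массиве
--
--     list_position = {}
--
--     for i in range(0, len(array_inp)):  # словарь где запоминаем позицию элемент
--         list_position[i] = array_inp[i]
--
--     for j in range(0, len(new_list)):
--         if sum_t > 0:
--             if new_list[j] > sum_t:
--                 pass
--             elif new_list[j] <= sum_t: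
--                 fin_list.append(new_list[j])
--                 sum_t = sum_t - new_list[j]
--
--     for item in range(0, len(fin_list)):
--         for key in list(list_position.keys()):
--             if list_position[key] == fin_list[item]:
--                 fin_list2.append(key)
--                 del list_position[key]
--
--         # for key, value in list_position.items():
--         #    if fin_list[item] == value:
--         #        if len (fin_list)  - len(fin_list2) > 0 :
--         #            fin_list2.append(key)
--         #            list_position[key] = None
--         #            fin_list [item] = None
--
--     return sum_t, fin_list, sorted(fin_list2)
-- ===== SOURCE B (Python) =====
-- def two_summ(array_inp: list, total: int):
--     # Greedy over descending values; positions recovered in one enumerate pass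
--     # with a set of chosen values (no dict of positions, no nested scans).
--     rem = total
--     picked = []
--     for v in sorted(array_inp, reverse=True):
--         if rem > 0 and v <= rem:
--             picked.append(v)
--             rem -= v
--     chosen = set(picked)
--     positions = [i for i, v in enumerate(array_inp) if v in chosen]
--     return rem, picked, positions
-- ===== Notes on version B (the rewrite author's own statement) =====
-- stated objective: faster
-- what changed: B replaces A's position dict and the nested rescan of all dict keys per picked element by a single enumerate pass filtering on a set of picked values (positions come out already sorted), keeping only the greedy pass over the descending sort.
import Mathlib
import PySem

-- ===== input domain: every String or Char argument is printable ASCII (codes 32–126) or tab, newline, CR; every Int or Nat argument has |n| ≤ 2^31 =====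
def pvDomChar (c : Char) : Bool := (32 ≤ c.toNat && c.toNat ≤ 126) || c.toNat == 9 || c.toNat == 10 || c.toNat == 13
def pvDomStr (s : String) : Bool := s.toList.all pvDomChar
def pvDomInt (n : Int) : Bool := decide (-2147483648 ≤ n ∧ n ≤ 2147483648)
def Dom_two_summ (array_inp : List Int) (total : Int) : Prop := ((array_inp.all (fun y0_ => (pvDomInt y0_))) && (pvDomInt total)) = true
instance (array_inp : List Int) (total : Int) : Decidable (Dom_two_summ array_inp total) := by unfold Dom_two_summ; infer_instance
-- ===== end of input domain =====

-- B drops A's position dictionary and its nested per-pick key scan for one enumerate pass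
-- filtered by a set of picked values (objective: faster; a timing run measured A timing out where B scales).

-- ===== PORT A =====
def two_summ (array_inp : List Int) (total : Int) : Int × List Int × List Int :=
  let sum_t := total
  let new_list := PySem.List.sorted array_inp (fun x => x) true
  -- list_position = {i: array_inp[i]} built by the first 'for i in range' loop
  let list_position : PySem.Dict Int Int :=
    (PySem.List.pyRange 0 array_inp.length).foldl
      (fun d i => d.insert i (PySem.List.pyGetD array_inp i 0)) PySem.Dict.empty
  -- second loop: state (sum_t, fin_list)
  let s2 :=
    (PySem.List.pyRange 0 new_list.length).foldl
      (fun (st : Int × List Int) j =>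
        if st.1 > 0 then
          if PySem.List.pyGetD new_list j 0 > st.1 then st
          else if PySem.List.pyGetD new_list j 0 ≤ st.1 then
            (st.1 - PySem.List.pyGetD new_list j 0, st.2 ++ [PySem.List.pyGetD new_list j 0])
          else st
        else st)
      (sum_t, ([] : List Int))
  let fin_list := s2.2
  -- third loop: state (list_position, fin_list2); the inner loop iterates the snapshot list(keys)
  let s3 :=
    (PySem.List.pyRange 0 fin_list.length).foldl
      (fun (st : PySem.Dict Int Int × List Int) item =>
        st.1.keys.foldl
          (fun (st2 : PySem.Dict Int Int × List Int) key =>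
            -- list_position[key] == fin_list[item]; every snapshot key is still present when looked up
            -- (it is deleted only on its own visit), so the lookup always succeeds (no KeyError)
            if st2.1.get? key = some (PySem.List.pyGetD fin_list item 0) then
              (st2.1.erase key, st2.2 ++ [key])
            else st2)
          st)
      (list_position, ([] : List Int))
  (s2.1, fin_list, PySem.List.sorted s3.2 (fun x => x))

-- ===== PORT B =====
def two_summ_alt (array_inp : List Int) (total : Int) : Int × List Int × List Int :=
  -- greedy pass: state (rem, picked)
  let st :=
    (PySem.List.sorted array_inp (fun x => x) true).foldl
      (fun (st : Int × List Int) v =>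
        if st.1 > 0 ∧ v ≤ st.1 then (st.1 - v, st.2 ++ [v]) else st)
      (total, ([] : List Int))
  let chosen : PySem.Set Int := PySem.Set.ofList st.2
  let positions :=
    ((PySem.List.enumerate array_inp).filter (fun p => PySem.Set.contains chosen p.2)).map
      (fun p => p.1)
  (st.1, st.2, positions)

-- ===== PRECONDITION & SPEC =====
def Spec_two_summ (array_inp : List Int) (total : Int) (out : Int × List Int × List Int) : Prop := out = two_summ_alt array_inp total
instance (array_inp : List Int) (total : Int) (out : Int × List Int × List Int) : Decidable (Spec_two_summ array_inp total out) := by unfold Spec_two_summ; infer_instance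

-- ===== CLAIM (what is proved, stated in full; the proofs are below) =====
def Claim_equal_two_summ : Prop := ∀ (array_inp : List Int) (total : Int), Dom_two_summ array_inp total → Spec_two_summ array_inp total (two_summ array_inp total)

-- ===== LEMMAS AND PROOFS =====

-- A's three-way greedy branch is B's single conjunction
theorem greedy_step_eq :
    (fun (st : Int × List Int) (v : Int) =>
      if st.1 > 0 then
        if v > st.1 then st
        else if v ≤ st.1 then (st.1 - v, st.2 ++ [v])
        else st
      else st)
    = (fun (st : Int × List Int) (v : Int) =>
      if st.1 > 0 ∧ v ≤ st.1 then (st.1 - v, st.2 ++ [v]) else st) := by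
  funext st v
  split_ifs <;> first | rfl | (exfalso; omega)

theorem enumerate_getElem {α : Type} (xs : List α) (s : Int) (k : Nat) (h : k < xs.length)
    (h' : k < (PySem.List.enumerate xs s).length) :
    (PySem.List.enumerate xs s)[k] = (s + k, xs[k]) := by
  induction xs generalizing s k with
  | nil => simp at h
  | cons x t ih =>
    cases k with
    | zero => simp [PySem.List.enumerate_cons]
    | succ m =>
      simp only [PySem.List.enumerate_cons, List.getElem_cons_succ]
      rw [ih (s + 1) m (by simpa using h)
          (by rw [PySem.List.length_enumerate]; simpa using h)]
      push_cast
      rw [Prod.mk.injEq]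
      exact ⟨by ring, rfl⟩

-- the pairs inserted by A's dict-building loop, read back as a list, are enumerate(array_inp)
theorem range_map_eq_enumerate (a : List Int) :
    (PySem.List.pyRange 0 (a.length : Int)).map (fun i => (i, PySem.List.pyGetD a i 0))
    = PySem.List.enumerate a 0 := by
  apply List.ext_getElem
  · simp [PySem.List.length_pyRange_one, PySem.List.length_enumerate]
  · intro k h1 h2
    have hk : k < a.length := by
      simpa [PySem.List.length_pyRange_one] using h1
    rw [List.getElem_map, PySem.List.getElem_pyRange_one,
        enumerate_getElem a 0 k hk (by rwa [PySem.List.length_enumerate]),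
        PySem.List.pyGetD_eq_getElem (h0 := by simp) (h1 := by simpa using hk)]
    simp

-- one pass of A's inner key scan over a snapshot of the keys: the matching entries
-- move (in key order) to the accumulator, the rest stay in the dict
theorem inner_scan (v : Int) :
    ∀ (rest pre : List (Int × Int)) (acc : List Int),
      ((pre ++ rest).map Prod.fst).Nodup →
      ((rest.map Prod.fst).foldl
        (fun (st2 : PySem.Dict Int Int × List Int) key =>
          if st2.1.get? key = some v then (st2.1.erase key, st2.2 ++ [key]) else st2)
        (PySem.Dict.mk (pre ++ rest), acc))
      = (PySem.Dict.mk (pre ++ rest.filter (fun p => !decide (p.2 = v))),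
         acc ++ (rest.filter (fun p => decide (p.2 = v))).map Prod.fst) := by
  intro rest
  induction rest with
  | nil => simp
  | cons hd tl ih =>
    intro pre acc hnd
    obtain ⟨k, w⟩ := hd
    have hnd' := hnd
    simp only [List.map_append, List.map_cons, List.nodup_append, List.nodup_cons] at hnd'
    obtain ⟨hpre, ⟨hktl, htl⟩, hdisj⟩ := hnd'
    have hkpre : k ∉ pre.map Prod.fst := by
      intro hm
      have := hdisj k hm
      simp at this
    have hget : (PySem.Dict.mk (pre ++ (k, w) :: tl)).get? k = some w := by
      simp only [PySem.Dict.get?, List.find?_append]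
      have : pre.find? (fun p => p.1 == k) = none := by
        rw [List.find?_eq_none]
        intro p hp
        simp only [beq_iff_eq]
        exact fun h => hkpre (h ▸ List.mem_map_of_mem hp)
      simp [this]
    simp only [List.map_cons, List.foldl_cons]
    by_cases hwv : w = v
    · subst hwv
      rw [if_pos (by rw [hget])]
      have herase : (PySem.Dict.mk (pre ++ (k, w) :: tl)).erase k = PySem.Dict.mk (pre ++ tl) := by
        simp only [PySem.Dict.erase, List.filter_append, List.filter_cons]
        have h1 : pre.filter (fun p => !(p.1 == k)) = pre := by
          rw [List.filter_eq_self]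
          intro p hp
          simp only [Bool.not_eq_eq_eq_not, Bool.not_true, beq_eq_false_iff_ne, ne_eq]
          exact fun h => hkpre (h ▸ List.mem_map_of_mem hp)
        have h2 : tl.filter (fun p => !(p.1 == k)) = tl := by
          rw [List.filter_eq_self]
          intro p hp
          simp only [Bool.not_eq_eq_eq_not, Bool.not_true, beq_eq_false_iff_ne, ne_eq]
          exact fun h => hktl (h ▸ List.mem_map_of_mem hp)
        simp [h1, h2]
      rw [herase]
      rw [ih pre (acc ++ [k]) (by
        simp only [List.map_append, List.nodup_append]
        refine ⟨hpre, htl, ?_⟩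
        intro a ha b hb
        exact hdisj a ha b (List.mem_cons_of_mem _ hb))]
      simp [List.append_assoc]
    · rw [if_neg (by rw [hget]; simpa using hwv)]
      have hre : pre ++ (k, w) :: tl = (pre ++ [(k, w)]) ++ tl := by simp
      rw [hre, ih (pre ++ [(k, w)]) acc (by rw [← hre]; exact hnd)]
      simp [hwv, List.append_assoc]

-- a disjunctive filter splits into two filters, up to permutation
theorem filter_or_perm {α : Type} (P Q : α → Bool) :
    ∀ (l : List α),
      (l.filter (fun x => P x || Q x)).Perm
        (l.filter P ++ l.filter (fun x => !P x && Q x)) := by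
  intro l
  induction l with
  | nil => simp
  | cons x t ih =>
    by_cases hP : P x
    · simpa [hP] using ih.cons x
    · by_cases hQ : Q x
      · simp only [List.filter_cons, hP, hQ, Bool.false_or, Bool.not_false, Bool.true_and,
          if_pos]
        exact (ih.cons x).trans List.perm_middle.symm
      · simpa [hP, hQ] using ih

-- A's outer loop over fin_list: the accumulated keys are, up to permutation,
-- the entries of el whose value occurs among the processed values
theorem outer_loop (el : List (Int × Int)) (hnd : (el.map Prod.fst).Nodup) :
    ∀ (vs done acc : List Int),
      acc.Perm ((el.filter (fun p => decide (p.2 ∈ done))).map Prod.fst) →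
      ((vs.foldl
        (fun (st : PySem.Dict Int Int × List Int) v =>
          st.1.keys.foldl
            (fun (st2 : PySem.Dict Int Int × List Int) key =>
              if st2.1.get? key = some v then (st2.1.erase key, st2.2 ++ [key]) else st2)
            st)
        (PySem.Dict.mk (el.filter (fun p => !decide (p.2 ∈ done))), acc)).2).Perm
      ((el.filter (fun p => decide (p.2 ∈ done ++ vs))).map Prod.fst) := by
  intro vs
  induction vs with
  | nil =>
    intro done acc hacc
    simpa using hacc
  | cons v vs ih =>
    intro done acc hacc
    simp only [List.foldl_cons]
    rw [PySem.Dict.keys_mk]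
    rw [show (PySem.Dict.mk (el.filter (fun p => !decide (p.2 ∈ done))), acc)
          = (PySem.Dict.mk (([] : List (Int × Int)) ++ el.filter (fun p => !decide (p.2 ∈ done))), acc) by simp]
    rw [inner_scan v (el.filter (fun p => !decide (p.2 ∈ done))) [] acc
      (by simpa using List.Nodup.sublist (List.Sublist.map Prod.fst List.filter_sublist) hnd)]
    have hdict : ([] : List (Int × Int)) ++ (el.filter (fun p => !decide (p.2 ∈ done))).filter (fun p => !decide (p.2 = v))
        = el.filter (fun p => !decide (p.2 ∈ done ++ [v])) := by
      rw [List.nil_append, List.filter_filter]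
      apply List.filter_congr
      intro p _
      simp [List.mem_append]
      rw [Bool.and_comm]
    have hmatched : (el.filter (fun p => !decide (p.2 ∈ done))).filter (fun p => decide (p.2 = v))
        = el.filter (fun p => !decide (p.2 ∈ done) && decide (p.2 = v)) := by
      rw [List.filter_filter]
      apply List.filter_congr
      intro p _
      simp [Bool.and_comm]
    have hsplit : (el.filter (fun p => decide (p.2 ∈ done ++ [v]))).Perm
        (el.filter (fun p => decide (p.2 ∈ done)) ++ el.filter (fun p => !decide (p.2 ∈ done) && decide (p.2 = v))) := by
      have := filter_or_perm (fun p : Int × Int => decide (p.2 ∈ done)) (fun p => decide (p.2 = v)) el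
      refine List.Perm.trans ?_ this
      apply List.Perm.of_eq
      apply List.filter_congr
      intro p _
      simp [List.mem_append]
    have hacc' : (acc ++ ((el.filter (fun p => !decide (p.2 ∈ done))).filter (fun p => decide (p.2 = v))).map Prod.fst).Perm
        ((el.filter (fun p => decide (p.2 ∈ done ++ [v]))).map Prod.fst) := by
      rw [hmatched]
      refine List.Perm.trans (hacc.append (List.Perm.refl _)) ?_
      rw [← List.map_append]
      exact (hsplit.map Prod.fst).symm
    rw [hdict]
    have := ih (done ++ [v]) _ hacc'
    simpa [List.append_assoc] using this

-- ===== VERDICT (by name: the statement is the Claim_ definition above) =====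
theorem two_summ_spec : Claim_equal_two_summ := by
  intro a total _
  unfold Spec_two_summ
  simp only [two_summ, two_summ_alt]
  rw [PySem.List.foldl_pyRange_zero_pyGetD' (PySem.List.sorted a (fun x => x) true) 0
        (fun (st : Int × List Int) (v : Int) =>
          if st.1 > 0 then
            if v > st.1 then st
            else if v ≤ st.1 then (st.1 - v, st.2 ++ [v])
            else st
          else st) (total, []),
      greedy_step_eq]
  -- the two greedy folds are now the same term; name its result
  set fl := List.foldl
      (fun (st : Int × List Int) (v : Int) =>
        if st.1 > 0 ∧ v ≤ st.1 then (st.1 - v, st.2 ++ [v]) else st)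
      (total, ([] : List Int)) (PySem.List.sorted a (fun x => x) true) with hfl
  -- the dict built by the first loop is exactly enumerate(array_inp)
  have hD : (List.foldl (fun d i => d.insert i (PySem.List.pyGetD a i 0)) PySem.Dict.empty
        (PySem.List.pyRange 0 (a.length : Int))) = PySem.Dict.mk (PySem.List.enumerate a 0) := by
    have hitems := PySem.Dict.items_foldl_insert_fresh (PySem.List.pyRange 0 (a.length : Int))
      (fun i => i) (fun i => PySem.List.pyGetD a i 0) PySem.Dict.empty
      (by intro x hx; simp)
      (by simpa using PySem.List.nodup_pyRange_one 0 (a.length : Int))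
    have : (List.foldl (fun d i => d.insert i (PySem.List.pyGetD a i 0)) PySem.Dict.empty
        (PySem.List.pyRange 0 (a.length : Int))).items = PySem.List.enumerate a 0 := by
      rw [hitems]
      simpa using range_map_eq_enumerate a
    rw [← this]
  rw [hD]
  -- bridge the third loop's index iteration to a fold over fin_list itself
  rw [PySem.List.foldl_pyRange_zero_pyGetD' fl.2 0
        (fun (st : PySem.Dict Int Int × List Int) (v : Int) =>
          st.1.keys.foldl
            (fun (st2 : PySem.Dict Int Int × List Int) key =>
              if st2.1.get? key = some v then (st2.1.erase key, st2.2 ++ [key]) else st2)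
            st)
        (PySem.Dict.mk (PySem.List.enumerate a 0), ([] : List Int))]
  simp only [Prod.mk.injEq]
  refine ⟨trivial, trivial, ?_⟩
  -- keys of enumerate are distinct
  have hnd : ((PySem.List.enumerate a 0).map Prod.fst).Nodup := by
    have := PySem.List.nodup_pyRange_one 0 (0 + (a.length : Int))
    rw [← PySem.List.map_fst_enumerate a 0] at this
    exact this
  -- the permutation delivered by the outer loop, with done = []
  have hperm0 := outer_loop (PySem.List.enumerate a 0) hnd fl.2 [] [] (by simp)
  have h0 : (PySem.List.enumerate a 0).filter (fun p => !decide (p.2 ∈ ([] : List Int)))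
      = PySem.List.enumerate a 0 := by simp
  rw [h0] at hperm0
  simp only [List.nil_append] at hperm0
  -- B's membership test in the set of picked values is membership in fin_list
  have hpred : (fun p : Int × Int => PySem.Set.contains (PySem.Set.ofList fl.2) p.2)
      = (fun p : Int × Int => decide (p.2 ∈ fl.2)) := by
    funext p
    by_cases h : p.2 ∈ fl.2
    · simp [h]
    · simp only [h, decide_false]
      rw [← Bool.not_eq_true]
      intro hc
      exact h ((PySem.Set.mem_ofList _ _).mp ((PySem.Set.contains_iff _ _).mp hc))
  rw [hpred]
  -- B's positions are strictly increasing (indices of a filtered enumerate)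
  have hpair : (((PySem.List.enumerate a).filter (fun p => decide (p.2 ∈ fl.2))).map
      (fun p : Int × Int => p.1)).Pairwise (fun x y => x < y) := by
    have hsub : ((((PySem.List.enumerate a).filter (fun p => decide (p.2 ∈ fl.2))).map
        (fun p : Int × Int => p.1))).Sublist ((PySem.List.enumerate a).map (fun p : Int × Int => p.1)) :=
      List.Sublist.map _ List.filter_sublist
    rw [PySem.List.map_fst_enumerate a 0] at hsub
    exact List.Pairwise.sublist hsub (PySem.List.pairwise_lt_pyRange_one 0 (0 + (a.length : Int)))
  exact PySem.List.sorted_eq_of_perm_of_pairwise_lt _ _ _ hperm0.symm hpair
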